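-- pv_equiv track=rewrite | github.com/DarknessRdg/URI | strings/1243.py | eh_palavra
-- ===== SOURCE A (Python) =====
-- def eh_palavra(text):
--     ponto = text.find('.')
--
--     if ponto == 0 or text.count('.') > 1:
--         return False
--     elif ponto != -1 and ponto < len(text) - 1:
--         return False
--
--     for i in text:
--         if i == '.':
--             continue
--         elif not 'a' <= i.lower() <= 'z':
--             return False
--
--     return True
-- ===== SOURCE B (Python) =====
-- def eh_palavra(text):
--     n = len(text)
--     for i, c in enumerate(text):
--         if c == '.':
--             if i != n - 1 or i == 0:
--                 return False
--         elif not 'a' <= c.lower() <= 'z':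
--             return False
--     return True
-- ===== Notes on version B (the rewrite author's own statement) =====
-- stated objective: alternative
-- what changed: Replaced A's three separate scans (find, count, then a validation loop) by a single enumerate pass that decides everything per character: a dot is accepted only at the final, non-initial index, which subsumes all of A's dot-placement checks.
import Mathlib
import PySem

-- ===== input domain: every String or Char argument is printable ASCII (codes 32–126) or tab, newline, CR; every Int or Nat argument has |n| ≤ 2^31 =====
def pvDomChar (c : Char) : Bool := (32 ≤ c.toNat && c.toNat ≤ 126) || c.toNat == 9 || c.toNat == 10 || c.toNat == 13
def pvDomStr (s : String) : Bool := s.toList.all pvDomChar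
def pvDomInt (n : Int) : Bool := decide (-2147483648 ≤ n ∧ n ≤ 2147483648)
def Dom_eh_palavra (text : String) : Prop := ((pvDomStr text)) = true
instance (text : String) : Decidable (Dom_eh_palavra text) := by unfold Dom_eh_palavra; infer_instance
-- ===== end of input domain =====

-- B replaces A's three scans (find, count, validation loop) by a single indexed pass; same results on all inputs.

-- ===== PORT A =====
-- the for-loop of A: every char is '.' (skipped) or must satisfy 'a' <= c.lower() <= 'z'
-- (single-char Python string comparison = code-point comparison, ported as Char ≤)
def ehApalLoop : List Char → Bool
  | [] => true
  | c :: rest =>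
    if c = '.' then ehApalLoop rest
    else if ¬ ('a' ≤ PySem.Chars.lowerChar c ∧ PySem.Chars.lowerChar c ≤ 'z') then false
    else ehApalLoop rest

def eh_palavra (text : String) : Bool :=
  let ponto := PySem.Str.find text "."
  if ponto = 0 ∨ PySem.Str.count text "." > 1 then false
  else if ponto ≠ -1 ∧ ponto < PySem.Str.len text - 1 then false
  else ehApalLoop text.toList

-- ===== PORT B =====
-- B's single pass: index i, total length n; a '.' is legal only when i = n-1 and i ≠ 0
def ehBpalLoop (n : Nat) : Nat → List Char → Bool
  | _, [] => true
  | i, c :: rest =>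
    if c = '.' then
      if i ≠ n - 1 ∨ i = 0 then false else ehBpalLoop n (i + 1) rest
    else if ¬ ('a' ≤ PySem.Chars.lowerChar c ∧ PySem.Chars.lowerChar c ≤ 'z') then false
    else ehBpalLoop n (i + 1) rest

def eh_palavra_alt (text : String) : Bool :=
  ehBpalLoop text.toList.length 0 text.toList

-- ===== PRECONDITION & SPEC =====
def Spec_eh_palavra (text : String) (out : Bool) : Prop := out = eh_palavra_alt text
instance (text : String) (out : Bool) : Decidable (Spec_eh_palavra text out) := by unfold Spec_eh_palavra; infer_instance

-- ===== CLAIM (what is proved, stated in full; the proofs are below) =====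
def Claim_equal_eh_palavra : Prop := ∀ (text : String), Dom_eh_palavra text → Spec_eh_palavra text (eh_palavra text)

-- ===== LEMMAS AND PROOFS =====

def pvLetter (c : Char) : Prop := 'a' ≤ PySem.Chars.lowerChar c ∧ PySem.Chars.lowerChar c ≤ 'z'

theorem ehApalLoop_iff (L : List Char) :
    ehApalLoop L = true ↔ ∀ c ∈ L, c ≠ '.' → pvLetter c := by
  induction L with
  | nil => simp [ehApalLoop]
  | cons c rest ih =>
    by_cases h1 : c = '.'
    · subst h1
      simp only [ehApalLoop, if_true]
      rw [ih]
      simp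
    · by_cases h2 : 'a' ≤ PySem.Chars.lowerChar c ∧ PySem.Chars.lowerChar c ≤ 'z'
      · simp only [ehApalLoop, if_neg h1, if_neg (not_not.mpr h2)]
        rw [ih]
        simp only [List.forall_mem_cons]
        have : c ≠ '.' → pvLetter c := fun _ => h2
        tauto
      · simp only [ehApalLoop, if_neg h1, if_pos h2]
        apply iff_of_false (by simp)
        intro h
        exact h2 (h c (by simp) h1)

theorem ehBpalLoop_iff (L : List Char) (n : Nat) : ∀ i,
    ehBpalLoop n i L = true ↔
      ∀ j (h : j < L.length),
        (L[j] = '.' → (i + j = n - 1 ∧ i + j ≠ 0)) ∧ (L[j] ≠ '.' → pvLetter L[j]) := by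
  induction L with
  | nil => simp [ehBpalLoop]
  | cons c rest ih =>
    intro i
    have step : ∀ (P : Prop), (ehBpalLoop n (i+1) rest = true ↔ P) →
        ((∀ j (h : j < rest.length),
          (rest[j] = '.' → (i + 1 + j = n - 1 ∧ i + 1 + j ≠ 0)) ∧
          (rest[j] ≠ '.' → pvLetter rest[j])) ↔
         (∀ j (h : j + 1 < (c :: rest).length),
          ((c :: rest)[j+1] = '.' → (i + (j+1) = n - 1 ∧ i + (j+1) ≠ 0)) ∧
          ((c :: rest)[j+1] ≠ '.' → pvLetter (c :: rest)[j+1]))) := by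
      intro _ _
      constructor
      · intro h j hj
        have := h j (by simpa using hj)
        simpa [show i + 1 + j = i + (j + 1) from by omega] using this
      · intro h j hj
        have := h j (by simpa using hj)
        simpa [show i + 1 + j = i + (j + 1) from by omega] using this
    by_cases h1 : c = '.'
    · subst h1
      by_cases h2 : i ≠ n - 1 ∨ i = 0
      · simp only [ehBpalLoop, if_true, if_pos h2]
        apply iff_of_false (by simp)
        intro h
        have := (h 0 (by simp)).1 (by simp)
        omega
      · simp only [ehBpalLoop, if_true, if_neg h2]
        rw [ih (i+1)]
        rw [step _ (ih (i+1))]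
        constructor
        · intro h j hj
          cases j with
          | zero =>
            simp only [List.getElem_cons_zero]
            exact ⟨fun _ => by omega, fun hne => absurd rfl hne⟩
          | succ k => exact h k (by omega)
        · intro h j hj
          exact h (j+1) (by simpa using hj)
    · by_cases h3 : 'a' ≤ PySem.Chars.lowerChar c ∧ PySem.Chars.lowerChar c ≤ 'z'
      · simp only [ehBpalLoop, if_neg h1, if_neg (not_not.mpr h3)]
        rw [ih (i+1)]
        rw [step _ (ih (i+1))]
        constructor
        · intro h j hj
          cases j with
          | zero =>
            simp only [List.getElem_cons_zero]
            exact ⟨fun hd => absurd hd h1, fun _ => h3⟩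
          | succ k => exact h k (by omega)
        · intro h j hj
          exact h (j+1) (by simpa using hj)
      · simp only [ehBpalLoop, if_neg h1, if_pos h3]
        apply iff_of_false (by simp)
        intro h
        exact h3 ((h 0 (by simp)).2 (by simpa using h1))

-- single-char Chars.count is List.count
theorem count_go_singleton (c : Char) (L : List Char) (fuel acc : Nat)
    (h : L.length ≤ fuel) :
    PySem.Chars.count.go [c] fuel L acc = acc + L.count c := by
  induction L generalizing fuel acc with
  | nil => cases fuel <;> simp [PySem.Chars.count.go]
  | cons a rest ih =>
    cases fuel with
    | zero => simp at h
    | succ f =>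
      have hlen : rest.length ≤ f := by
        simp only [List.length_cons] at h; omega
      simp only [PySem.Chars.count.go]
      by_cases hac : a = c
      · subst hac
        rw [if_pos (by simp [List.isPrefixOf])]
        rw [show List.drop [a].length (a :: rest) = rest from by simp]
        rw [ih f (acc + 1) hlen]
        simp
        omega
      · rw [if_neg (by simp [List.isPrefixOf]; first | exact hac | (intro e; exact hac e.symm))]
        rw [ih f acc hlen]
        simp [hac]

theorem count_singleton (c : Char) (L : List Char) :
    PySem.Chars.count L [c] = L.count c := by
  simp only [PySem.Chars.count]
  rw [if_neg (by simp), count_go_singleton c L L.length 0 le_rfl]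
  simp

theorem singleton_infix_iff (c : Char) (L : List Char) : [c] <:+: L ↔ c ∈ L := by
  constructor
  · intro h; exact List.singleton_sublist.mp h.sublist
  · intro h
    obtain ⟨s, t, rfl⟩ := List.mem_iff_append.mp h
    exact ⟨s, t, by simp⟩

theorem singleton_prefix_drop_iff (c : Char) (L : List Char) (m : Nat) :
    [c] <+: L.drop m ↔ L[m]? = some c := by
  have key : (L.drop m).head? = L[m]? := by
    simp [List.head?_eq_getElem?, List.getElem?_drop]
  constructor
  · intro h
    rw [← key]
    cases hd : L.drop m with
    | nil => rw [hd] at h; simp at h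
    | cons a t =>
      rw [hd] at h
      rcases List.cons_prefix_cons.mp h with ⟨rfl, -⟩
      simp
  · intro h
    rw [← key] at h
    cases hd : L.drop m with
    | nil => rw [hd] at h; simp at h
    | cons a t =>
      rw [hd] at h
      simp only [List.head?_cons, Option.some.injEq] at h
      subst h
      simp [List.cons_prefix_cons]

-- ===== VERDICT (by name: the statement is the Claim_ definition above) =====
theorem eh_palavra_spec : Claim_equal_eh_palavra := by
  intro text _
  unfold Spec_eh_palavra eh_palavra eh_palavra_alt
  dsimp only
  set L := text.toList with hLdef
  set n := L.length with hn
  have hfind : PySem.Str.find text "." = PySem.Chars.find L ['.'] := by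
    simp [PySem.Str.find_eq, hLdef]
  have hcount : (PySem.Str.count text "." : Nat) = L.count '.' := by
    rw [show PySem.Str.count text "." = PySem.Chars.count L ['.'] from by
          simp [PySem.Str.count_eq, hLdef]]
    exact count_singleton '.' L
  have hlen : PySem.Str.len text = (n : Int) := by
    simp [PySem.Str.len, hLdef, hn]
  rw [hfind, hcount, hlen]
  rw [show ehBpalLoop L.length 0 L = ehBpalLoop n 0 L from rfl]
  set f := PySem.Chars.find L ['.'] with hf
  rw [Bool.eq_iff_iff]
  rw [ehBpalLoop_iff]
  constructor
  · -- A = true → B-prop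
    intro hA
    split_ifs at hA with h1 h2
    push_neg at h1 h2
    rw [ehApalLoop_iff] at hA
    intro j hj
    refine ⟨?_, fun hne => hA _ (L.getElem_mem hj) hne⟩
    intro hdot
    -- '.' occurs, so find is ≥ 0 and points at first dot
    have hmem : '.' ∈ L := by rw [← hdot]; exact L.getElem_mem hj
    have hpos : 0 ≤ f := by
      rw [hf, PySem.Chars.find_nonneg_iff, singleton_infix_iff]; exact hmem
    obtain ⟨hpre, hmin⟩ := PySem.Chars.find_spec (s := L) (sub := ['.']) (by rwa [← hf])
    rw [singleton_prefix_drop_iff] at hpre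
    set m := f.toNat with hm
    have hmlt : m < n := by
      rw [hn]; exact (List.getElem?_eq_some_iff.mp hpre).1
    have hLm : L[m]'(by omega) = '.' := by
      have := List.getElem?_eq_some_iff.mp hpre
      obtain ⟨h', e⟩ := this; simpa using e
    have hfm : f = (m : Int) := by omega
    have hmn1 : m = n - 1 := by
      have := h2 (by omega)
      rw [hfm] at this
      omega
    have hm0 : m ≠ 0 := by
      intro h0; rw [hfm, h0] at h1; exact h1.1 rfl
    -- j is a dot index; show j = m (count ≤ 1 forbids a second dot)
    have hjm : j = m := by
      by_contra hne
      rcases Nat.lt_or_ge j m with hlt | hge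
      · exact (hmin j hlt) (by rw [singleton_prefix_drop_iff, List.getElem?_eq_some_iff]; exact ⟨by omega, hdot⟩)
      · have hjgt : m < j := by omega
        -- decompose L around m: two dots force count ≥ 2
        have hdecomp : L = L.take m ++ '.' :: L.drop (m + 1) := by
          conv_lhs => rw [← List.take_append_drop m L]
          congr 1
          rw [List.drop_eq_getElem_cons (by omega), hLm]
        have hmemdrop : '.' ∈ L.drop (m + 1) := by
          have : (L.drop (m + 1))[j - (m+1)]'(by simp; omega) = '.' := by
            rw [List.getElem_drop]
            have : m + 1 + (j - (m + 1)) = j := by omega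
            simp_rw [this]; exact hdot
          rw [← this]; exact List.getElem_mem _
        have : 2 ≤ L.count '.' := by
          conv_rhs => rw [hdecomp]
          rw [List.count_append, List.count_cons]
          have := List.count_pos_iff.mpr hmemdrop
          simp
          omega
        omega
    rw [hjm]; exact ⟨by omega, by omega⟩
  · -- B-prop → A = true
    intro hB
    have hloop : ehApalLoop L = true := by
      rw [ehApalLoop_iff]
      intro c hc hne
      obtain ⟨j, hj, rfl⟩ := List.mem_iff_getElem.mp hc
      exact (hB j hj).2 hne
    by_cases hmem : '.' ∈ L
    · obtain ⟨j, hj, hdot⟩ := List.mem_iff_getElem.mp hmem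
      have hjprop := (hB j hj).1 hdot
      have hn2 : 2 ≤ n := by omega
      -- every dot index equals n-1, so count = 1 and find = n-1
      have hall : ∀ k (hk : k < n), L[k] = '.' → k = n - 1 := by
        intro k hk hdk; exact ((hB k hk).1 hdk).1.symm ▸ by
          have := ((hB k hk).1 hdk); omega
      have hpos : 0 ≤ f := by
        rw [hf, PySem.Chars.find_nonneg_iff, singleton_infix_iff]; exact hmem
      obtain ⟨hpre, _⟩ := PySem.Chars.find_spec (s := L) (sub := ['.']) (by rwa [← hf])
      rw [singleton_prefix_drop_iff] at hpre
      set m := f.toNat with hm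
      have hmlt : m < n := (List.getElem?_eq_some_iff.mp hpre).1
      have hLm : L[m]'hmlt = '.' := by
        obtain ⟨h', e⟩ := List.getElem?_eq_some_iff.mp hpre; simpa using e
      have hmeq : m = n - 1 := hall m hmlt hLm
      have hfm : f = (m : Int) := by omega
      have hcnt : L.count '.' ≤ 1 := by
        have hdecomp : L = L.take m ++ '.' :: L.drop (m + 1) := by
          conv_lhs => rw [← List.take_append_drop m L]
          congr 1
          rw [List.drop_eq_getElem_cons (by omega), hLm]
        have htail : L.drop (m + 1) = [] := by
          rw [List.drop_eq_nil_iff]; omega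
        have hhead : (L.take m).count '.' = 0 := by
          rw [List.count_eq_zero]
          intro hmem'
          obtain ⟨k, hk, hdk⟩ := List.mem_iff_getElem.mp hmem'
          have hk' : k < n := by simp at hk; omega
          have : L[k]'hk' = '.' := by
            simpa using hdk
          have := hall k hk' this
          simp at hk
          omega
        conv_lhs => rw [hdecomp]
        rw [List.count_append, htail, hhead]
        simp
      rw [if_neg, if_neg, hloop]
      · rw [hfm]; push_neg; intro _; omega
      · push_neg
        constructor
        · rw [hfm]; omega
        · omega
    · -- no dot at all
      have hf1 : f = -1 := by
        rw [hf, PySem.Chars.find_eq_neg_one_iff, singleton_infix_iff]; exact hmem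
      have hcnt : L.count '.' = 0 := List.count_eq_zero.mpr (by simpa using hmem)
      rw [if_neg, if_neg, hloop]
      · push_neg; intro h; exact absurd hf1 h
      · rw [hf1, hcnt]; push_neg; norm_num
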